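-- pv_equiv track=rewrite | github.com/Intruder9211/DSA-2025 | DAY-02/03_Pairing_Lucky_Stones_in_the_Village_Festival.py | find_lucky_stone_pairs
-- ===== SOURCE A (Python) =====
-- def find_lucky_stone_pairs(p, n, m, stones):
--     # Step 1: Filter stones divisible by either N or M
--     lucky_stones = []
--     for stone in stones:
--         if stone % n == 0 or stone % m == 0:
--             lucky_stones.append(stone)
--
--     # Step 2: Count all unique pairs (i, j) where i < j
--     count = 0
--     for i in range(len(lucky_stones)):
--         for j in range(i + 1, len(lucky_stones)):
--             count += 1
--
--     return count
-- ===== SOURCE B (Python) =====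
-- def find_lucky_stone_pairs(p, n, m, stones):
--     # Count lucky stones once, then use the closed form C(k,2) = k*(k-1)//2.
--     k = sum(1 for stone in stones if stone % n == 0 or stone % m == 0)
--     return k * (k - 1) // 2
-- ===== Notes on version B (the rewrite author's own statement) =====
-- stated objective: simpler
-- what changed: Replaces the nested pair-counting loops over the filtered list by a single counting pass and the closed form k*(k-1)//2.
import Mathlib
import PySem

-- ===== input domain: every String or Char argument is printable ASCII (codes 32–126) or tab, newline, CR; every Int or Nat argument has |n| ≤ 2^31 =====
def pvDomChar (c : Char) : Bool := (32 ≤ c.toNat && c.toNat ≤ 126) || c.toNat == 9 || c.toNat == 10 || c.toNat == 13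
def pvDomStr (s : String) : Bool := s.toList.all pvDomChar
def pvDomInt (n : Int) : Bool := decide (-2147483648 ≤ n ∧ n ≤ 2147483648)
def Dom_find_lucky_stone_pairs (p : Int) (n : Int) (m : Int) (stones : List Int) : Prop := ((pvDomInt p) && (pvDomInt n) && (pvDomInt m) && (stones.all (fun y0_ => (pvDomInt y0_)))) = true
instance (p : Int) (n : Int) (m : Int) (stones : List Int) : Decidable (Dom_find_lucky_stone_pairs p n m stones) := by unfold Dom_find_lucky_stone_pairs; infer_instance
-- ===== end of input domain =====

-- B replaces A's nested pair-counting loops by one counting pass and the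
-- closed form k*(k-1)//2 (objective: simpler).

-- ===== PORT A =====
def find_lucky_stone_pairs (p : Int) (n : Int) (m : Int) (stones : List Int) : Int :=
  -- Step 1: filter stones divisible by either n or m (appended one by one, as in A)
  let lucky_stones : List Int :=
    stones.foldl (fun acc stone =>
      if PySem.Int.mod stone n == 0 || PySem.Int.mod stone m == 0 then acc ++ [stone] else acc) []
  -- Step 2: nested loops counting all pairs (i, j) with i < j
  (PySem.List.pyRange 0 (lucky_stones.length : Int) 1).foldl
    (fun count i =>
      (PySem.List.pyRange (i + 1) (lucky_stones.length : Int) 1).foldl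
        (fun c _ => c + 1) count) 0

-- ===== PORT B =====
def find_lucky_stone_pairs_alt (p : Int) (n : Int) (m : Int) (stones : List Int) : Int :=
  -- k = sum(1 for stone in stones if stone % n == 0 or stone % m == 0)
  let k : Int :=
    ((stones.countP (fun stone =>
      PySem.Int.mod stone n == 0 || PySem.Int.mod stone m == 0) : Nat) : Int)
  PySem.Int.floordiv (k * (k - 1)) 2

-- ===== PRECONDITION & SPEC =====
-- Pre_ excludes exactly the inputs where Python A raises ZeroDivisionError:
-- n = 0, or m = 0 with some stone not divisible by n (the right operand of 'or' is
-- only evaluated when the left is False).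
def Pre_find_lucky_stone_pairs (p : Int) (n : Int) (m : Int) (stones : List Int) : Prop :=
  n ≠ 0 ∧ (m ≠ 0 ∨ stones.all (fun stone => PySem.Int.mod stone n == 0) = true)
instance (p : Int) (n : Int) (m : Int) (stones : List Int) : Decidable (Pre_find_lucky_stone_pairs p n m stones) := by unfold Pre_find_lucky_stone_pairs; infer_instance
def pvWitness_find_lucky_stone_pairs : Int × Int × Int × List Int := (0, 2, 3, [2, 3, 5])

def Spec_find_lucky_stone_pairs (p : Int) (n : Int) (m : Int) (stones : List Int) (out : Int) : Prop := out = find_lucky_stone_pairs_alt p n m stones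
instance (p : Int) (n : Int) (m : Int) (stones : List Int) (out : Int) : Decidable (Spec_find_lucky_stone_pairs p n m stones out) := by unfold Spec_find_lucky_stone_pairs; infer_instance

-- ===== CLAIM (what is proved, stated in full; the proofs are below) =====
def Claim_equal_find_lucky_stone_pairs : Prop := ∀ (p : Int) (n : Int) (m : Int) (stones : List Int), Dom_find_lucky_stone_pairs p n m stones → Pre_find_lucky_stone_pairs p n m stones → Spec_find_lucky_stone_pairs p n m stones (find_lucky_stone_pairs p n m stones)

-- ===== LEMMAS AND PROOFS =====

-- A's append-accumulator loop builds init ++ filter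
theorem pv_foldl_append_filter (P : Int → Bool) (xs : List Int) (init : List Int) :
    xs.foldl (fun acc x => if P x then acc ++ [x] else acc) init = init ++ xs.filter P := by
  induction xs generalizing init with
  | nil => simp
  | cons x xs ih =>
    by_cases h : P x <;> simp [h, ih]

-- the inner loop just adds the range length
theorem pv_foldl_count (l : List Int) (c : Int) :
    l.foldl (fun c _ => c + 1) c = c + l.length := by
  induction l generalizing c with
  | nil => simp
  | cons x xs ih => simp [List.foldl_cons, ih]; ring

-- sum of (k - j - 1) over range k is C(k,2)
theorem pv_sum (k : Nat) :
    ((List.range k).map (fun j => (k : Int) - ((j : Nat) : Int) - 1)).sum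
      = ((k * (k - 1) / 2 : Nat) : Int) := by
  induction k with
  | zero => simp
  | succ k ih =>
    rw [List.range_succ, List.map_append, List.sum_append]
    have hc : ((List.range k).map (fun j => ((k + 1 : Nat) : Int) - ((j : Nat) : Int) - 1)).sum
        = ((List.range k).map (fun j => ((k : Int) - ((j : Nat) : Int) - 1) + 1)).sum := by
      congr 1
      apply List.map_congr_left
      intro j _
      push_cast; ring
    rw [hc, PySem.List.sum_map_add_int, ih, PySem.List.sum_map_const_int]
    have h2 : (k + 1) * (k + 1 - 1) / 2 = k * (k - 1) / 2 + k := by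
      cases k with
      | zero => rfl
      | succ j =>
        simp only [Nat.add_sub_cancel]
        have h3 : (j + 1 + 1) * (j + 1) = (j + 1) * j + (j + 1) * 2 := by ring
        rw [h3, Nat.add_mul_div_right _ _ (by omega)]
    rw [h2, Nat.cast_add]
    simp [List.length_range]

-- the outer loop over range(0, k) sums the inner-range lengths, i.e. C(k,2)
theorem pv_outer_loop (k : Nat) :
    (PySem.List.pyRange 0 (k : Int) 1).foldl
      (fun count i => (PySem.List.pyRange (i + 1) (k : Int) 1).foldl (fun c _ => c + 1) count) 0
      = ((k * (k - 1) / 2 : Nat) : Int) := by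
  have h1 : (PySem.List.pyRange 0 (k : Int) 1).foldl
      (fun count i => (PySem.List.pyRange (i + 1) (k : Int) 1).foldl (fun c _ => c + 1) count) 0
      = (PySem.List.pyRange 0 (k : Int) 1).foldl
      (fun count i => count + (((PySem.List.pyRange (i + 1) (k : Int) 1).length : Nat) : Int)) 0 := by
    apply PySem.List.foldl_congr_mem
    intro acc i _
    rw [pv_foldl_count]
  rw [h1, PySem.List.foldl_add, PySem.List.pyRange_one]
  simp only [sub_zero, Int.toNat_natCast, List.map_map]
  rw [← pv_sum k]
  rw [zero_add]
  congr 1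
  apply List.map_congr_left
  intro j hj
  simp only [Function.comp_apply, zero_add, PySem.List.length_pyRange_one]
  have hjk : j < k := List.mem_range.mp hj
  omega

-- C(k,2) as a floordiv
theorem pv_floordiv_choose (k : Nat) :
    PySem.Int.floordiv ((k : Int) * ((k : Int) - 1)) 2 = ((k * (k - 1) / 2 : Nat) : Int) := by
  cases k with
  | zero => decide
  | succ j =>
    have h1 : ((j + 1 : Nat) : Int) * (((j + 1 : Nat) : Int) - 1) = (((j + 1) * j : Nat) : Int) := by
      push_cast; ring
    rw [h1, show (2 : Int) = ((2 : Nat) : Int) from rfl, PySem.Int.floordiv_natCast]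
    simp

-- ===== VERDICT (by name: the statement is the Claim_ definition above) =====
theorem find_lucky_stone_pairs_spec : Claim_equal_find_lucky_stone_pairs := by
  intro p n m stones _ _
  unfold Spec_find_lucky_stone_pairs find_lucky_stone_pairs find_lucky_stone_pairs_alt
  simp only []
  rw [pv_foldl_append_filter]
  simp only [List.nil_append]
  rw [pv_outer_loop, pv_floordiv_choose]
  simp [List.countP_eq_length_filter]
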